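-- pv_equiv track=rewrite | github.com/vbshuliar/educast-ai | src/script_generator.py | format_for_elevenlabs
-- ===== SOURCE A (Python) =====
-- from typing import Dict, List, Optional
--
-- def format_for_elevenlabs(script: List[Dict], speaker_config: List[Dict]) -> List[Dict]:
--     """
--     Format script for ElevenLabs text-to-dialogue API
--
--     Args:
--         script: Generated dialogue script
--         speaker_config: Speaker configuration with voice IDs
--
--     Returns:
--         List formatted for ElevenLabs API
--     """
--     # Create speaker name to voice_id mapping
--     voice_map = {speaker['name']: speaker['voice_id'] for speaker in speaker_config}
--
--     formatted = []
--     for turn in script: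
--         speaker_name = turn.get('speaker')
--         voice_id = voice_map.get(speaker_name, speaker_config[0]['voice_id'])
--
--         formatted.append({
--             "text": turn.get('text', ''),
--             "voice_id": voice_id
--         })
--
--     return formatted
-- ===== SOURCE B (Python) =====
-- from typing import Dict, List
--
--
-- def format_for_elevenlabs(script: List[Dict], speaker_config: List[Dict]) -> List[Dict]:
--     """Inverted loop nesting: seed every turn with the default (first) voice,
--     then sweep speaker_config once, overwriting each matching turn's voice, so
--     later entries with the same name win by overwrite."""
--     voices = [speaker_config[0]['voice_id'] for _ in script]
--     names = [turn.get('speaker') for turn in script]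
--     for sp in speaker_config:
--         name, vid = sp['name'], sp['voice_id']
--         for i, nm in enumerate(names):
--             if nm == name:
--                 voices[i] = vid
--     return [{"text": turn.get('text', ''), "voice_id": vid}
--             for turn, vid in zip(script, voices)]
-- ===== Notes on version B (the rewrite author's own statement) =====
-- stated objective: alternative
-- what changed: Inverts the loop nesting: instead of building a name-to-voice dict and looking each turn up, B seeds all turns with the default voice and sweeps speaker_config once, overwriting matching turns in a voices array (last entry wins by overwrite).
import Mathlib
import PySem

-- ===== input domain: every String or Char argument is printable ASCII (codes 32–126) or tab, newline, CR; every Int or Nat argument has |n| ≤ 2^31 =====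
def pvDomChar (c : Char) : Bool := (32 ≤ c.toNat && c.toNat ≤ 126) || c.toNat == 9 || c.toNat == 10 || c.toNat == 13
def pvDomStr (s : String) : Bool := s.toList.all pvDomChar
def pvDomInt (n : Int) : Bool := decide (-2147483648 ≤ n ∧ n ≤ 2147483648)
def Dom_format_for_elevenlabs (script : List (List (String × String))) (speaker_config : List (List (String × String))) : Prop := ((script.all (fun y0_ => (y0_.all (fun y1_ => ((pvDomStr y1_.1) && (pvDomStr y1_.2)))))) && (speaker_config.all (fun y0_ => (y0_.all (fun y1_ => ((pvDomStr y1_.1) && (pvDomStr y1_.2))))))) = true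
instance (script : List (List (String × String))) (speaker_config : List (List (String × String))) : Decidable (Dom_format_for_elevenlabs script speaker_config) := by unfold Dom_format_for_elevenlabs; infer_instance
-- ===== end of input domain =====

-- B inverts the loop nesting: no voice_map dict; it seeds a voices array with the default and sweeps speaker_config once, overwriting matching turns (alternative decomposition, same outputs).


-- d[k] / d.get(k) on a Python dict passed in as an association list: first match (keys of a real dict are unique).
def pyGetItem? (d : List (String × String)) (k : String) : Option String :=
  (d.find? (fun p => p.1 == k)).map (·.2)

-- ===== PORT A =====
def format_for_elevenlabs (script : List (List (String × String))) (speaker_config : List (List (String × String))) : List (List (String × String)) :=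
  -- voice_map = {speaker['name']: speaker['voice_id'] for speaker in speaker_config}
  -- (the .getD "" arms are unreachable under Pre_, where every speaker has both keys)
  let voice_map : PySem.Dict String String :=
    speaker_config.foldl
      (fun m sp => m.insert ((pyGetItem? sp "name").getD "") ((pyGetItem? sp "voice_id").getD ""))
      PySem.Dict.empty
  script.foldl
    (fun acc turn =>
      let speaker_name := pyGetItem? turn "speaker"
      -- speaker_config[0]['voice_id'] is evaluated eagerly; Pre_ guarantees it exists when script ≠ []
      let dflt := (pyGetItem? (speaker_config.headD []) "voice_id").getD ""
      let voice_id := match speaker_name with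
        | none => dflt           -- None is never a key of voice_map
        | some n => voice_map.getD n dflt
      acc ++ [[("text", (pyGetItem? turn "text").getD ""), ("voice_id", voice_id)]])
    []

-- ===== PORT B =====
def format_for_elevenlabs_alt (script : List (List (String × String))) (speaker_config : List (List (String × String))) : List (List (String × String)) :=
  -- voices = [speaker_config[0]['voice_id'] for _ in script]
  let voices0 : List String :=
    script.map (fun _ => (pyGetItem? (speaker_config.headD []) "voice_id").getD "")
  -- names = [turn.get('speaker') for turn in script]
  let names : List (Option String) := script.map (fun turn => pyGetItem? turn "speaker")
  -- for sp in speaker_config: overwrite matching positions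
  let voices : List String :=
    speaker_config.foldl
      (fun vs sp =>
        let name := (pyGetItem? sp "name").getD ""
        let vid := (pyGetItem? sp "voice_id").getD ""
        List.zipWith (fun nm v => if nm == some name then vid else v) names vs)
      voices0
  (script.zip voices).map (fun tv =>
    [("text", (pyGetItem? tv.1 "text").getD ""), ("voice_id", tv.2)])

-- ===== PRECONDITION & SPEC =====
-- Pre_ excludes exactly the inputs where A raises: a speaker_config entry missing the
-- 'name' or 'voice_id' key (KeyError in the comprehension), or a nonempty script with an
-- empty speaker_config (IndexError from the eagerly evaluated speaker_config[0]).
def Pre_format_for_elevenlabs (script : List (List (String × String))) (speaker_config : List (List (String × String))) : Prop :=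
  (∀ sp ∈ speaker_config, (pyGetItem? sp "name").isSome = true ∧ (pyGetItem? sp "voice_id").isSome = true) ∧
  (script ≠ [] → speaker_config ≠ [])
instance (script : List (List (String × String))) (speaker_config : List (List (String × String))) : Decidable (Pre_format_for_elevenlabs script speaker_config) := by unfold Pre_format_for_elevenlabs; infer_instance

def pvWitness_format_for_elevenlabs : (List (List (String × String))) × (List (List (String × String))) :=
  ([[("speaker", "Bob"), ("text", "hi")], [("text", "t")]],
   [[("name", "Ann"), ("voice_id", "v1")], [("name", "Bob"), ("voice_id", "v2")]])

def Spec_format_for_elevenlabs (script : List (List (String × String))) (speaker_config : List (List (String × String))) (out : List (List (String × String))) : Prop := out = format_for_elevenlabs_alt script speaker_config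
instance (script : List (List (String × String))) (speaker_config : List (List (String × String))) (out : List (List (String × String))) : Decidable (Spec_format_for_elevenlabs script speaker_config out) := by unfold Spec_format_for_elevenlabs; infer_instance

-- ===== CLAIM (what is proved, stated in full; the proofs are below) =====
def Claim_equal_format_for_elevenlabs : Prop := ∀ (script : List (List (String × String))) (speaker_config : List (List (String × String))), Dom_format_for_elevenlabs script speaker_config → Pre_format_for_elevenlabs script speaker_config → Spec_format_for_elevenlabs script speaker_config (format_for_elevenlabs script speaker_config)

-- ===== LEMMAS AND PROOFS =====

-- find? only looks at the predicate's values on the list's members.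
lemma find?_congr_mem {α : Type} (l : List α) (p q : α → Bool) (h : ∀ x ∈ l, p x = q x) :
    l.find? p = l.find? q := by
  induction l with
  | nil => rfl
  | cons a t ih =>
    simp only [List.find?_cons, h a (List.mem_cons_self)]
    cases q a
    · exact ih (fun x hx => h x (List.mem_cons_of_mem _ hx))
    · rfl

-- A's voice_map fold lookup equals a last-wins (reversed first-match) scan of the config.
lemma getD_foldl_insert_eq_rev_find (cfg : List (List (String × String)))
    (d : PySem.Dict String String) (n dflt : String) :
    (cfg.foldl (fun m sp => m.insert ((pyGetItem? sp "name").getD "") ((pyGetItem? sp "voice_id").getD "")) d).getD n dflt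
      = match cfg.reverse.find? (fun sp => (pyGetItem? sp "name").getD "" == n) with
        | some sp => (pyGetItem? sp "voice_id").getD ""
        | none => d.getD n dflt := by
  induction cfg generalizing d with
  | nil => simp
  | cons sp t ih =>
    simp only [List.foldl_cons, List.reverse_cons, List.find?_append, ih]
    cases ht : t.reverse.find? (fun sp => (pyGetItem? sp "name").getD "" == n) with
    | some sp' => simp
    | none =>
      simp only [Option.none_or, List.find?_singleton]
      by_cases h : (pyGetItem? sp "name").getD "" = n
      · simp [h, PySem.Dict.getD_insert_self]
      · rw [PySem.Dict.getD_insert, if_neg (fun hh => h hh.symm)]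
        simp [h]

-- B's overwrite fold, restricted to one position, equals the same reversed first-match scan.
lemma foldl_overwrite_eq_rev_find (cfg : List (List (String × String)))
    (nm : Option String) (dflt : String) :
    cfg.foldl (fun v sp => if nm == some ((pyGetItem? sp "name").getD "") then (pyGetItem? sp "voice_id").getD "" else v) dflt
      = match cfg.reverse.find? (fun sp => nm == some ((pyGetItem? sp "name").getD "")) with
        | some sp => (pyGetItem? sp "voice_id").getD ""
        | none => dflt := by
  induction cfg generalizing dflt with
  | nil => rfl
  | cons sp t ih =>
    simp only [List.foldl_cons, List.reverse_cons, List.find?_append, ih]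
    cases ht : t.reverse.find? (fun sp => nm == some ((pyGetItem? sp "name").getD "")) with
    | some sp' => simp
    | none =>
      simp only [Option.none_or, List.find?_singleton]
      by_cases h : nm = some ((pyGetItem? sp "name").getD "")
      · simp [h]
      · simp [h]

-- zipWith over a list and a map of the same list is a single map.
lemma zipWith_self_map {α β γ : Type} (l : List α) (f : α → β → γ) (g : α → β) :
    List.zipWith f l (l.map g) = l.map (fun a => f a (g a)) := by
  induction l with
  | nil => rfl
  | cons a t ih => simp [ih]

-- the pointwise (zipWith) fold over cfg acts independently at each names position.
lemma foldl_zipWith_eq_map {α β : Type} (cfg : List α) (f : α → Option String → β → β)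
    (names : List (Option String)) (g : Option String → β) :
    cfg.foldl (fun vs sp => List.zipWith (fun nm v => f sp nm v) names vs) (names.map g)
      = names.map (fun nm => cfg.foldl (fun v sp => f sp nm v) (g nm)) := by
  induction cfg generalizing g with
  | nil => simp
  | cons sp t ih =>
    simp only [List.foldl_cons]
    rw [zipWith_self_map names (fun nm v => f sp nm v) g, ih (fun nm => f sp nm (g nm))]

-- zipping a list with a map of itself is a map of pairs.
lemma zip_self_map {α β : Type} (l : List α) (h : α → β) :
    l.zip (l.map h) = l.map (fun a => (a, h a)) := by
  induction l with
  | nil => rfl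
  | cons a t ih => simp [ih]

-- ===== VERDICT (by name: the statement is the Claim_ definition above) =====
theorem format_for_elevenlabs_spec : Claim_equal_format_for_elevenlabs := by
  intro script cfg _ hpre
  unfold Spec_format_for_elevenlabs format_for_elevenlabs format_for_elevenlabs_alt
  rw [PySem.List.foldl_append_singleton_eq_map]
  have hvoices :
      cfg.foldl
        (fun vs sp =>
          List.zipWith (fun nm v => if nm == some ((pyGetItem? sp "name").getD "") then (pyGetItem? sp "voice_id").getD "" else v)
            (script.map (fun turn => pyGetItem? turn "speaker")) vs)
        (script.map (fun _ => (pyGetItem? (cfg.headD []) "voice_id").getD ""))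
      = script.map (fun turn =>
          cfg.foldl (fun v sp => if pyGetItem? turn "speaker" == some ((pyGetItem? sp "name").getD "") then (pyGetItem? sp "voice_id").getD "" else v)
            ((pyGetItem? (cfg.headD []) "voice_id").getD "")) := by
    have h := foldl_zipWith_eq_map cfg
      (fun sp nm v => if nm == some ((pyGetItem? sp "name").getD "") then (pyGetItem? sp "voice_id").getD "" else v)
      (script.map (fun turn => pyGetItem? turn "speaker"))
      (fun _ => (pyGetItem? (cfg.headD []) "voice_id").getD "")
    rw [List.map_map, List.map_map] at h
    exact h
  simp only [List.nil_append, hvoices, zip_self_map, List.map_map]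
  apply List.map_congr_left
  intro turn _
  simp only [Function.comp]
  congr 1
  rw [foldl_overwrite_eq_rev_find]
  cases hsn : pyGetItem? turn "speaker" with
  | none =>
    have h0 : cfg.reverse.find? (fun sp => (none : Option String) == some ((pyGetItem? sp "name").getD "")) = none := by
      apply List.find?_eq_none.mpr; intro sp _; simp
    simp only [h0]
  | some n =>
    dsimp only
    rw [getD_foldl_insert_eq_rev_find]
    have hfind : cfg.reverse.find? (fun sp => some n == some ((pyGetItem? sp "name").getD ""))
        = cfg.reverse.find? (fun sp => (pyGetItem? sp "name").getD "" == n) := by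
      apply find?_congr_mem; intro sp _
      simp [BEq.comm]
    rw [hfind]
    cases cfg.reverse.find? (fun sp => (pyGetItem? sp "name").getD "" == n) <;> simp [PySem.Dict.getD_empty]
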